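-- pv_equiv track=rewrite | github.com/lmp-decaderan/Evolutionary-Strategies | weight_get_normal_distribution.py | get_sentence_level_v2
-- ===== SOURCE A (Python) =====
-- def get_level(data,level_th=None):
--     for index,value in enumerate(level_th):
--         if data < value:
--             return index
--
-- def get_sentence_level_v2(datalist = None,level_th = [16,1000]):
--
--     #level_th = [15,1000] 38.73
--     #level_th = [20,1000] 38.64
--     #level_th = [12,1000] 38.38
--     #level_th = [13,1000] 38.41
--     #level_th = [17,1000] 38.53
--     #level_th = [14,1000] 38.56
--     #level_th = [10,1000]
--
--     #level_th = [10,15,1000] 1:38.52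
--     #level_th = [10,16,1000] 2:38.47
--     #level_th = [12,15,1000]  1:
--     #level_th = [12,16,1000]
--     #level_th = [12,20,1000] 1:
--     #level_th = [10,18,1000] 1:
--     #level_th = [12,18,1000]
--
--     result = []
--     for key in datalist:
--         result.append(get_level(key,level_th))
--     if len(datalist) == len(result):
--         return result
--     else:
--         raise
-- ===== SOURCE B (Python) =====
-- def get_sentence_level_v2(datalist=None, level_th=[16, 1000]):
--     # threshold-major sweep: start from all-None, walk thresholds from last to
--     # first and overwrite every position whose key is below that threshold;
--     # the final overwrite at each position is the *first* matching index.
--     result = [None] * len(datalist)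
--     for index, value in reversed(list(enumerate(level_th))):
--         result = [index if key < value else r for key, r in zip(datalist, result)]
--     return result
-- ===== Notes on version B (the rewrite author's own statement) =====
-- stated objective: alternative
-- what changed: Replaces the per-element first-match linear scan with an inverted, threshold-major back-to-front sweep that starts from all-None and overwrites positions, so the last overwrite yields the first matching index; the unreachable length-check/raise is dropped.
import Mathlib
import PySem

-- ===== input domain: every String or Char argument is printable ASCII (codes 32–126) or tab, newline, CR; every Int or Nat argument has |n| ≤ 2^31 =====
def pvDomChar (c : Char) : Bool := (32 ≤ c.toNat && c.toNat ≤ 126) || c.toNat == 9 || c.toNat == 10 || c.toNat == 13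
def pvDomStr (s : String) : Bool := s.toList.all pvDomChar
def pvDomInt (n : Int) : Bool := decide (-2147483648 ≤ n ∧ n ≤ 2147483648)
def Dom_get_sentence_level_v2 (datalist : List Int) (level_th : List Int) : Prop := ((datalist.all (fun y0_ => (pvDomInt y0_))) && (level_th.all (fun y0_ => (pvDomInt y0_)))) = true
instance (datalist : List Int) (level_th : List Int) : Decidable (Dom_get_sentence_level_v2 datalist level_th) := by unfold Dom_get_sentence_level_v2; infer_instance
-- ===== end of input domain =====

-- B replaces A's per-element first-match scan by a threshold-major back-to-front
-- overwrite sweep (alternative structure, same cost); return values proved equal.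

-- ===== PORT A =====
-- for index,value in enumerate(level_th): if data < value: return index   (falls off -> None)
def get_level_loop (data : Int) : List (Int × Int) → Option Int
  | [] => none
  | (i, v) :: rest => if data < v then some i else get_level_loop data rest

def get_level (data : Int) (level_th : List Int) : Option Int :=
  get_level_loop data (PySem.List.enumerate level_th)

def get_sentence_level_v2 (datalist : List Int) (level_th : List Int) : List (Option Int) :=
  let result := datalist.foldl (fun r key => r ++ [get_level key level_th]) []
  if datalist.length == result.length then result
  else []  -- Python 'raise': unreachable (result has one entry per key)

-- ===== PORT B =====
-- result = [index if key < value else r for key, r in zip(datalist, result)]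
def gsl_step (datalist : List Int) (result : List (Option Int)) (iv : Int × Int) : List (Option Int) :=
  (datalist.zip result).map (fun kr => if kr.1 < iv.2 then some iv.1 else kr.2)

def get_sentence_level_v2_alt (datalist : List Int) (level_th : List Int) : List (Option Int) :=
  ((PySem.List.enumerate level_th).reverse).foldl (gsl_step datalist)
    (datalist.map (fun _ => none))

-- ===== PRECONDITION & SPEC =====
def Spec_get_sentence_level_v2 (datalist : List Int) (level_th : List Int) (out : List (Option Int)) : Prop := out = get_sentence_level_v2_alt datalist level_th
instance (datalist : List Int) (level_th : List Int) (out : List (Option Int)) : Decidable (Spec_get_sentence_level_v2 datalist level_th out) := by unfold Spec_get_sentence_level_v2; infer_instance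

-- ===== CLAIM (what is proved, stated in full; the proofs are below) =====
def Claim_equal_get_sentence_level_v2 : Prop := ∀ (datalist : List Int) (level_th : List Int), Dom_get_sentence_level_v2 datalist level_th → Spec_get_sentence_level_v2 datalist level_th (get_sentence_level_v2 datalist level_th)

-- ===== LEMMAS AND PROOFS =====
theorem foldl_append_singleton {α β : Type} (f : α → β) :
    ∀ (xs : List α) (acc : List β),
      xs.foldl (fun r k => r ++ [f k]) acc = acc ++ xs.map f := by
  intro xs
  induction xs with
  | nil => intro acc; simp
  | cons x xs ih => intro acc; simp [List.foldl, ih]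

theorem zip_map_self {α β γ : Type} (g : α → β) (h : α × β → γ) :
    ∀ (xs : List α), (xs.zip (xs.map g)).map h = xs.map (fun x => h (x, g x)) := by
  intro xs
  induction xs with
  | nil => rfl
  | cons x xs ih => simp [List.zip] at ih ⊢; exact ih

theorem sweep_eq_scan (datalist : List Int) :
    ∀ (ps : List (Int × Int)),
      (ps.reverse).foldl (gsl_step datalist) (datalist.map (fun _ => none)) =
        datalist.map (fun k => get_level_loop k ps) := by
  intro ps
  rw [List.foldl_reverse]
  induction ps with
  | nil => rfl
  | cons p ps ih =>
    obtain ⟨i, v⟩ := p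
    rw [List.foldr_cons, ih]
    unfold gsl_step
    rw [zip_map_self]
    simp only [get_level_loop]

theorem get_sentence_level_v2_spec : Claim_equal_get_sentence_level_v2 := by
  intro datalist level_th _
  show get_sentence_level_v2 datalist level_th = get_sentence_level_v2_alt datalist level_th
  unfold get_sentence_level_v2 get_sentence_level_v2_alt
  rw [sweep_eq_scan, foldl_append_singleton, List.nil_append]
  simp only [List.length_map, beq_self_eq_true, if_true, get_level]
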